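-- pv_equiv track=rewrite | github.com/RavenDS/flatout-blender-tools | scripts/bgm_tool_pc.py | _psp_split_pc_strip
-- ===== SOURCE A (Python) =====
-- def _psp_split_pc_strip(indices):
--     """Split a FlatOut 2 PC triangle strip into clean sub-strips.
--
--     FO2 PC strips join sub-strips with a degenerate run of the form:
--       [..., A, A, B, B, B, C, ...]
--     where A is the last vertex of the preceding sub-strip (repeated once)
--     and B is the first vertex of the next sub-strip (repeated twice before
--     the actual sub-strip content begins).
--
--     This function removes all such join runs and returns the list of
--     sub-strip index sequences (each at least 3 elements long).
--     """
--     subs = []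
--     n = len(indices)
--     i = 0
--     while i < n:
--         start = i
--         # advance j to the first position where indices[j] == indices[j+1]
--         j = i
--         while j < n - 1 and indices[j] != indices[j + 1]:
--             j += 1
--         sub = indices[start : j + 1]
--         if len(sub) >= 3:
--             subs.append(sub)
--         if j >= n - 1:
--             break
--         # skip the A-run (repeated last vert of this sub-strip)
--         A = indices[j]
--         i = j
--         while i < n and indices[i] == A:
--             i += 1
--         if i >= n:
--             break
--         # advance to the last B in the B-run (first vert of next sub-strip)
--         B = indices[i]
--         while i < n - 1 and indices[i + 1] == B:
--             i += 1
--         # i now points to the last B, which is the first vert of the next sub-strip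
--     return subs
-- ===== SOURCE B (Python) =====
-- def _psp_split_pc_strip(indices):
--     """Single-pass state machine: 0 = building a sub-strip, 1 = skipping the
--     repeated-A join run, 2 = inside the B run (next strip starts at its last B)."""
--     subs = []
--     cur = []
--     state = 0
--     key = 0
--     for x in indices:
--         if state == 0:
--             if cur and x == cur[-1]:
--                 if len(cur) >= 3:
--                     subs.append(cur)
--                 state = 1
--                 key = x
--             else:
--                 cur.append(x)
--         elif state == 1:
--             if x != key:
--                 state = 2
--                 key = x
--         else:
--             if x != key:
--                 cur = [key, x]
--                 state = 0
--     if state == 0 and len(cur) >= 3: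
--         subs.append(cur)
--     return subs
-- ===== Notes on version B (the rewrite author's own statement) =====
-- stated objective: alternative
-- what changed: Replaced A's index-based outer while loop with three inner rescanning while loops by a single left-to-right fold over the elements driving an explicit 3-state machine (building sub-strip / skipping the repeated-A run / inside the B run), with no index arithmetic.
import Mathlib
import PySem

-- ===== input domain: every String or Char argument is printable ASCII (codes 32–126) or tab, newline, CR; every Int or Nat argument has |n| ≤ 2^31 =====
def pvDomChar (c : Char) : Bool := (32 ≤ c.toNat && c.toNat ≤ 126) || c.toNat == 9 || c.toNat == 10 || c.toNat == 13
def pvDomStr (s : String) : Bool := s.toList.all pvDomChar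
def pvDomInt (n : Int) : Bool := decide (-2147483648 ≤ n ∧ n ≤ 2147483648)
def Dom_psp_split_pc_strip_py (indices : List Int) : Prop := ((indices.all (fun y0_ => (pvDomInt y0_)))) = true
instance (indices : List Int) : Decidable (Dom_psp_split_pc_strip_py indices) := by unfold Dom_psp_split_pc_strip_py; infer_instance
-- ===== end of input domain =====

-- B replaces A's index-juggling nested while loops by a single left-to-right fold with an
-- explicit 3-state machine (building / skipping the A-run / inside the B-run); same O(n) cost,
-- simpler single pass ("alternative" objective). Equality of return values is proved on all inputs.

-- ===== PORT A =====
-- inner while loop: advance j while j < n-1 and indices[j] != indices[j+1]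
-- (indices.getD j 0 is indices[j]; the loop guard keeps j, j+1 in range, so getD is exact)
def pspScanJ (indices : List Int) (n j : Nat) : Nat :=
  if h : j < n - 1 ∧ indices.getD j 0 ≠ indices.getD (j + 1) 0 then
    pspScanJ indices n (j + 1)
  else j
termination_by n - 1 - j
decreasing_by exact Nat.sub_succ_lt_self (n - 1) j h.1

-- while i < n and indices[i] == A: i += 1
def pspSkipA (indices : List Int) (n i : Nat) (A : Int) : Nat :=
  if h : i < n ∧ indices.getD i 0 = A then pspSkipA indices n (i + 1) A else i
termination_by n - i
decreasing_by exact Nat.sub_succ_lt_self n i h.1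

-- while i < n - 1 and indices[i+1] == B: i += 1
def pspScanB (indices : List Int) (n i : Nat) (B : Int) : Nat :=
  if h : i < n - 1 ∧ indices.getD (i + 1) 0 = B then pspScanB indices n (i + 1) B else i
termination_by n - 1 - i
decreasing_by exact Nat.sub_succ_lt_self (n - 1) i h.1

theorem pspScanJ_ge (indices : List Int) (n j : Nat) : j ≤ pspScanJ indices n j := by
  induction j using pspScanJ.induct indices n with
  | case1 j h ih => rw [pspScanJ, dif_pos h]; exact Nat.le_of_succ_le ih
  | case2 j h => rw [pspScanJ, dif_neg h]

theorem pspSkipA_ge (indices : List Int) (n i : Nat) (A : Int) : i ≤ pspSkipA indices n i A := by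
  induction i using pspSkipA.induct indices n (A := A) with
  | case1 i h ih => rw [pspSkipA, dif_pos h]; exact Nat.le_of_succ_le ih
  | case2 i h => rw [pspSkipA, dif_neg h]

theorem pspSkipA_gt (indices : List Int) (n i : Nat) (A : Int)
    (h1 : i < n) (h2 : indices.getD i 0 = A) : i < pspSkipA indices n i A := by
  rw [pspSkipA, dif_pos ⟨h1, h2⟩]
  exact Nat.lt_of_lt_of_le (Nat.lt_succ_self i) (pspSkipA_ge indices n (i + 1) A)

theorem pspScanB_ge (indices : List Int) (n i : Nat) (B : Int) : i ≤ pspScanB indices n i B := by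
  induction i using pspScanB.induct indices n (B := B) with
  | case1 i h ih => rw [pspScanB, dif_pos h]; exact Nat.le_of_succ_le ih
  | case2 i h => rw [pspScanB, dif_neg h]

theorem pspScanJ_lt (indices : List Int) (n j : Nat) (h0 : j < n) : pspScanJ indices n j < n := by
  induction j using pspScanJ.induct indices n with
  | case1 j h ih => rw [pspScanJ, dif_pos h]; exact ih (Nat.add_lt_of_lt_sub h.1)
  | case2 j h => rw [pspScanJ, dif_neg h]; exact h0

-- outer while loop of A; terminates since each iteration strictly increases i
def pspOuter (indices : List Int) (n i : Nat) (subs : List (List Int)) : List (List Int) :=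
  if hi : i < n then
    let j := pspScanJ indices n i
    -- sub = indices[i : j+1]
    let sub := PySem.List.slice indices (some (i : Int)) (some ((j + 1 : Nat) : Int))
    let subs' := if sub.length ≥ 3 then subs ++ [sub] else subs
    if j ≥ n - 1 then subs'
    else
      let A := indices.getD j 0
      let i' := pspSkipA indices n j A
      if i' ≥ n then subs'
      else
        let B := indices.getD i' 0
        let i'' := pspScanB indices n i' B
        pspOuter indices n i'' subs'
  else subs
termination_by n - i
decreasing_by
  have h1 : i ≤ pspScanJ indices n i := pspScanJ_ge indices n i
  have h2 : pspScanJ indices n i < pspSkipA indices n (pspScanJ indices n i) (indices.getD (pspScanJ indices n i) 0) :=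
    pspSkipA_gt indices n (pspScanJ indices n i) (indices.getD (pspScanJ indices n i) 0)
      (pspScanJ_lt indices n i hi) rfl
  have h3 := pspScanB_ge indices n (pspSkipA indices n (pspScanJ indices n i) (indices.getD (pspScanJ indices n i) 0)) (indices.getD (pspSkipA indices n (pspScanJ indices n i) (indices.getD (pspScanJ indices n i) 0)) 0)
  exact Nat.sub_lt_sub_left hi (Nat.lt_of_le_of_lt h1 (Nat.lt_of_lt_of_le h2 h3))

def psp_split_pc_strip_py (indices : List Int) : List (List Int) :=
  pspOuter indices indices.length 0 []

-- ===== PORT B =====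
-- one fold step of the state machine; state 0 = building cur, 1 = skipping the A-run,
-- 2 = inside the B-run (key holds A resp. B)
def pspStep (st : Nat × Int × List Int × List (List Int)) (x : Int) :
    Nat × Int × List Int × List (List Int) :=
  match st with
  | (state, key, cur, subs) =>
    if state = 0 then
      if cur ≠ [] ∧ x = cur.getLastD 0 then
        (1, x, cur, if cur.length ≥ 3 then subs ++ [cur] else subs)
      else (0, key, cur ++ [x], subs)
    else if state = 1 then
      if x ≠ key then (2, x, cur, subs) else (state, key, cur, subs)
    else
      if x ≠ key then (0, key, [key, x], subs) else (state, key, cur, subs)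

def psp_split_pc_strip_py_alt (indices : List Int) : List (List Int) :=
  match indices.foldl pspStep (0, 0, [], []) with
  | (state, _, cur, subs) => if state = 0 ∧ cur.length ≥ 3 then subs ++ [cur] else subs

-- ===== PRECONDITION & SPEC =====
def Spec_psp_split_pc_strip_py (indices : List Int) (out : List (List Int)) : Prop := out = psp_split_pc_strip_py_alt indices
instance (indices : List Int) (out : List (List Int)) : Decidable (Spec_psp_split_pc_strip_py indices out) := by unfold Spec_psp_split_pc_strip_py; infer_instance

-- ===== CLAIM (what is proved, stated in full; the proofs are below) =====
def Claim_equal_psp_split_pc_strip_py : Prop := ∀ (indices : List Int), Dom_psp_split_pc_strip_py indices → Spec_psp_split_pc_strip_py indices (psp_split_pc_strip_py indices)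

-- ===== LEMMAS AND PROOFS =====

-- finalisation applied to a fold result
def pspFin (st : Nat × Int × List Int × List (List Int)) : List (List Int) :=
  match st with
  | (state, _, cur, subs) => if state = 0 ∧ cur.length ≥ 3 then subs ++ [cur] else subs

-- exit conditions and value facts of the three inner loops
theorem pspScanJ_exit (indices : List Int) (n j : Nat) :
    ¬(pspScanJ indices n j < n - 1 ∧
      indices.getD (pspScanJ indices n j) 0 ≠ indices.getD (pspScanJ indices n j + 1) 0) := by
  induction j using pspScanJ.induct indices n with
  | case1 j h ih => rw [pspScanJ, dif_pos h]; exact ih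
  | case2 j h => rw [pspScanJ, dif_neg h]; exact h

theorem pspSkipA_exit (indices : List Int) (n i : Nat) (A : Int) :
    ¬(pspSkipA indices n i A < n ∧ indices.getD (pspSkipA indices n i A) 0 = A) := by
  induction i using pspSkipA.induct indices n (A := A) with
  | case1 i h ih => rw [pspSkipA, dif_pos h]; exact ih
  | case2 i h => rw [pspSkipA, dif_neg h]; exact h

theorem pspScanB_exit (indices : List Int) (n i : Nat) (B : Int) :
    ¬(pspScanB indices n i B < n - 1 ∧ indices.getD (pspScanB indices n i B + 1) 0 = B) := by
  induction i using pspScanB.induct indices n (B := B) with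
  | case1 i h ih => rw [pspScanB, dif_pos h]; exact ih
  | case2 i h => rw [pspScanB, dif_neg h]; exact h

theorem pspScanB_lt (indices : List Int) (n i : Nat) (B : Int) (h0 : i < n) :
    pspScanB indices n i B < n := by
  induction i using pspScanB.induct indices n (B := B) with
  | case1 i h ih => rw [pspScanB, dif_pos h]; exact ih (by omega)
  | case2 i h => rw [pspScanB, dif_neg h]; exact h0

theorem pspScanB_val (indices : List Int) (n i : Nat) (B : Int) (hv : indices.getD i 0 = B) :
    indices.getD (pspScanB indices n i B) 0 = B := by
  induction i using pspScanB.induct indices n (B := B) with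
  | case1 i h ih => rw [pspScanB, dif_pos h]; exact ih h.2
  | case2 i h => rw [pspScanB, dif_neg h]; exact hv

-- evaluation lemmas for one step of the machine
theorem step0_app (k x : Int) (cur : List Int) (subs : List (List Int))
    (h : ¬(cur ≠ [] ∧ x = cur.getLastD 0)) :
    pspStep (0, k, cur, subs) x = (0, k, cur ++ [x], subs) := by
  simp only [pspStep, if_neg h]
  rfl

theorem step0_dup (k x : Int) (cur : List Int) (subs : List (List Int))
    (h : cur ≠ [] ∧ x = cur.getLastD 0) :
    pspStep (0, k, cur, subs) x = (1, x, cur, if cur.length ≥ 3 then subs ++ [cur] else subs) := by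
  simp only [pspStep, if_pos h]
  rfl

theorem step1_stay (A x : Int) (cur : List Int) (subs : List (List Int)) (h : x = A) :
    pspStep (1, A, cur, subs) x = (1, A, cur, subs) := by
  simp [pspStep, h]

theorem step1_go (A x : Int) (cur : List Int) (subs : List (List Int)) (h : x ≠ A) :
    pspStep (1, A, cur, subs) x = (2, x, cur, subs) := by
  simp [pspStep, h]

theorem step2_stay (B x : Int) (cur : List Int) (subs : List (List Int)) (h : x = B) :
    pspStep (2, B, cur, subs) x = (2, B, cur, subs) := by
  simp [pspStep, h]

theorem step2_go (B x : Int) (cur : List Int) (subs : List (List Int)) (h : x ≠ B) :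
    pspStep (2, B, cur, subs) x = (0, B, [B, x], subs) := by
  simp [pspStep, h]

-- dropping at an in-range position exposes the head element, written with getD
theorem drop_eq_getD_cons (l : List Int) (i : Nat) (h : i < l.length) :
    l.drop i = l.getD i 0 :: l.drop (i + 1) := by
  rw [List.drop_eq_getElem_cons h, List.getD_eq_getElem l 0 h]

-- in state 0 the key component never influences the final answer
theorem key_irrel (l : List Int) : ∀ (k k' : Int) (cur : List Int) (subs : List (List Int)),
    pspFin (l.foldl pspStep (0, k, cur, subs)) = pspFin (l.foldl pspStep (0, k', cur, subs)) := by
  induction l with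
  | nil => intro k k' cur subs; rfl
  | cons x t ih =>
    intro k k' cur subs
    by_cases h : cur ≠ [] ∧ x = cur.getLastD 0
    · simp only [List.foldl_cons, step0_dup _ _ _ _ h]
    · simp only [List.foldl_cons, step0_app _ _ _ _ h]
      exact ih _ _ _ _

-- a nonempty list's getLastD ignores its default
theorem getLastD_irrel (l : List Int) (h : l ≠ []) (d d' : Int) : l.getLastD d = l.getLastD d' := by
  rw [List.getLastD_eq_getLast?, List.getLastD_eq_getLast?]
  obtain ⟨a, ha⟩ := Option.isSome_iff_exists.mp (List.getLast?_isSome.mpr h)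
  rw [ha]; rfl

-- the last element of the slice indices[i : j+1]
theorem seg_getLast (indices : List Int) :
    ∀ (d i j : Nat), j = i + d → j < indices.length →
    ((indices.drop i).take (d + 1)).getLastD 0 = indices.getD j 0 := by
  intro d
  induction d with
  | zero =>
    intro i j hj hlen
    obtain rfl : j = i := by omega
    rw [drop_eq_getD_cons indices j (by omega)]
    simp
  | succ d ih =>
    intro i j hj hlen
    rw [drop_eq_getD_cons indices i (by omega), List.take_succ_cons, List.getLastD_cons]
    have hne : (indices.drop (i + 1)).take (d + 1) ≠ [] := by
      have : ((indices.drop (i + 1)).take (d + 1)).length = min (d + 1) (indices.length - (i + 1)) := by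
        simp
      intro hc
      rw [hc] at this
      simp at this
      omega
    rw [getLastD_irrel _ hne _ 0]
    exact ih (i + 1) j (by omega) hlen

-- the slice indices[i : j+1] is nonempty when i ≤ j < length
theorem seg_ne_nil (indices : List Int) (i j : Nat) (hij : i ≤ j) (hj : j < indices.length) :
    (indices.drop i).take (j + 1 - i) ≠ [] := by
  have : ((indices.drop i).take (j + 1 - i)).length = min (j + 1 - i) (indices.length - i) := by
    simp
  intro hc
  rw [hc] at this
  simp at this
  omega

-- phase 0: the fold walks the duplicate-free stretch, appending it to cur
theorem fold_phase0 (indices : List Int) :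
    ∀ (i : Nat) (k : Int) (cur : List Int) (subs : List (List Int)),
    i < indices.length →
    (cur ≠ [] → cur.getLastD 0 ≠ indices.getD i 0) →
    (indices.drop i).foldl pspStep (0, k, cur, subs)
      = (indices.drop (pspScanJ indices indices.length i + 1)).foldl pspStep
          (0, k, cur ++ (indices.drop i).take (pspScanJ indices indices.length i + 1 - i), subs) := by
  intro i
  induction i using pspScanJ.induct indices indices.length with
  | case1 i h ih =>
    intro k cur subs hi hcur
    have hstep : pspStep (0, k, cur, subs) (indices.getD i 0) = (0, k, cur ++ [indices.getD i 0], subs) := by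
      apply step0_app
      rintro ⟨hne, hlast⟩
      exact hcur hne hlast.symm
    rw [drop_eq_getD_cons indices i hi, List.foldl_cons, hstep]
    have hj1 : i + 1 < indices.length := by omega
    have hrec := ih k (cur ++ [indices.getD i 0]) subs hj1 (by
      intro _
      rw [getLastD_irrel _ (by simp) 0 (indices.getD i 0), List.getLastD_concat]
      exact h.2)
    have hJ : pspScanJ indices indices.length i = pspScanJ indices indices.length (i + 1) := by
      conv_lhs => rw [pspScanJ]
      rw [dif_pos h]
    have hge : i + 1 ≤ pspScanJ indices indices.length (i + 1) := pspScanJ_ge _ _ _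
    have h1 : pspScanJ indices indices.length (i + 1) + 1 - i
        = (pspScanJ indices indices.length (i + 1) + 1 - (i + 1)) + 1 := by omega
    rw [hrec, hJ, h1, List.take_succ_cons]
    simp
  | case2 i h =>
    intro k cur subs hi hcur
    rw [pspScanJ, dif_neg h]
    have h1 : i + 1 - i = 1 := by omega
    rw [drop_eq_getD_cons indices i hi, List.foldl_cons, h1, List.take_succ_cons, List.take_zero]
    rw [step0_app]
    rintro ⟨hne, hlast⟩
    exact hcur hne hlast.symm

-- phase 1: the fold skips the rest of the A-run
theorem fold_phase1 (indices : List Int) (A : Int) :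
    ∀ (i : Nat) (cur : List Int) (subs : List (List Int)),
    (indices.drop i).foldl pspStep (1, A, cur, subs)
      = (indices.drop (pspSkipA indices indices.length i A)).foldl pspStep (1, A, cur, subs) := by
  intro i
  induction i using pspSkipA.induct indices indices.length (A := A) with
  | case1 i h ih =>
    intro cur subs
    rw [pspSkipA, dif_pos h, drop_eq_getD_cons indices i h.1, List.foldl_cons,
      step1_stay _ _ _ _ h.2]
    exact ih cur subs
  | case2 i h =>
    intro cur subs
    rw [pspSkipA, dif_neg h]

-- phase 2: the fold stays inside the B-run up to its last element
theorem fold_phase2 (indices : List Int) (B : Int) :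
    ∀ (i : Nat) (cur : List Int) (subs : List (List Int)),
    (indices.drop (i + 1)).foldl pspStep (2, B, cur, subs)
      = (indices.drop (pspScanB indices indices.length i B + 1)).foldl pspStep (2, B, cur, subs) := by
  intro i
  induction i using pspScanB.induct indices indices.length (B := B) with
  | case1 i h ih =>
    intro cur subs
    rw [pspScanB, dif_pos h, drop_eq_getD_cons indices (i + 1) (by omega), List.foldl_cons,
      step2_stay _ _ _ _ h.2]
    exact ih cur subs
  | case2 i h =>
    intro cur subs
    rw [pspScanB, dif_neg h]

-- restarting the machine at the last B gives the same final answer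
theorem fold_restart (indices : List Int) (i : Nat) (B : Int) (subs : List (List Int))
    (h1 : i + 1 < indices.length) (hB : indices.getD i 0 = B)
    (hx : indices.getD (i + 1) 0 ≠ B) :
    pspFin ((indices.drop (i + 2)).foldl pspStep (0, B, [B, indices.getD (i + 1) 0], subs))
      = pspFin ((indices.drop i).foldl pspStep (0, 0, [], subs)) := by
  rw [drop_eq_getD_cons indices i (by omega), drop_eq_getD_cons indices (i + 1) h1]
  rw [List.foldl_cons, List.foldl_cons]
  rw [step0_app _ _ _ _ (by simp), List.nil_append]
  rw [step0_app _ _ _ _ (by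
    rintro ⟨-, hlast⟩
    rw [hB] at hlast
    exact hx (by simpa using hlast))]
  rw [hB]
  exact key_irrel _ B 0 _ _

-- flattened one-iteration unfolding of the outer loop
theorem pspOuter_unfold (indices : List Int) (n i : Nat) (subs : List (List Int)) (hi : i < n) :
    pspOuter indices n i subs =
      if pspScanJ indices n i ≥ n - 1 then
        (if (PySem.List.slice indices (some (i : Int)) (some ((pspScanJ indices n i + 1 : Nat) : Int))).length ≥ 3
          then subs ++ [PySem.List.slice indices (some (i : Int)) (some ((pspScanJ indices n i + 1 : Nat) : Int))]
          else subs)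
      else if n ≤ pspSkipA indices n (pspScanJ indices n i) (indices.getD (pspScanJ indices n i) 0) then
        (if (PySem.List.slice indices (some (i : Int)) (some ((pspScanJ indices n i + 1 : Nat) : Int))).length ≥ 3
          then subs ++ [PySem.List.slice indices (some (i : Int)) (some ((pspScanJ indices n i + 1 : Nat) : Int))]
          else subs)
      else
        pspOuter indices n
          (pspScanB indices n
            (pspSkipA indices n (pspScanJ indices n i) (indices.getD (pspScanJ indices n i) 0))
            (indices.getD (pspSkipA indices n (pspScanJ indices n i) (indices.getD (pspScanJ indices n i) 0)) 0))
          (if (PySem.List.slice indices (some (i : Int)) (some ((pspScanJ indices n i + 1 : Nat) : Int))).length ≥ 3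
            then subs ++ [PySem.List.slice indices (some (i : Int)) (some ((pspScanJ indices n i + 1 : Nat) : Int))]
            else subs) := by
  rw [pspOuter, dif_pos hi]

theorem master_aux (indices : List Int) :
    ∀ (m i : Nat) (subs : List (List Int)),
    indices.length - i ≤ m → i ≤ indices.length →
    pspFin ((indices.drop i).foldl pspStep (0, 0, [], subs))
      = pspOuter indices indices.length i subs := by
  intro m
  induction m with
  | zero =>
    intro i subs hm hle
    obtain rfl : i = indices.length := by omega
    rw [List.drop_length, List.foldl_nil, pspOuter, dif_neg (by omega)]
    simp [pspFin]
  | succ m ih =>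
    intro i subs hm hle
    by_cases hi : i < indices.length
    · rw [fold_phase0 indices i 0 [] subs hi (by simp), List.nil_append]
      rw [pspOuter_unfold indices indices.length i subs hi, PySem.List.slice_natCast]
      set J := pspScanJ indices indices.length i with hJdef
      set seg := (indices.drop i).take (J + 1 - i) with hsegdef
      have hjge : i ≤ J := pspScanJ_ge _ _ _
      have hjlt : J < indices.length := pspScanJ_lt _ _ _ hi
      have hjex := pspScanJ_exit indices indices.length i
      by_cases hend : J ≥ indices.length - 1
      · rw [if_pos hend, List.drop_eq_nil_of_le (by omega), List.foldl_nil]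
        simp [pspFin]
      · rw [if_neg hend]
        have hJn1 : J < indices.length - 1 := by omega
        have hdup : indices.getD J 0 = indices.getD (J + 1) 0 := by
          by_contra hne
          exact hjex ⟨hJn1, hne⟩
        have hsegne : seg ≠ [] := seg_ne_nil indices i J hjge hjlt
        have hseglast : seg.getLastD 0 = indices.getD J 0 := by
          have h1 : J + 1 - i = (J - i) + 1 := by omega
          rw [hsegdef, h1]
          exact seg_getLast indices (J - i) i J (by omega) hjlt
        rw [drop_eq_getD_cons indices (J + 1) (by omega), List.foldl_cons]
        rw [step0_dup _ _ _ _ ⟨hsegne, by rw [hseglast, hdup]⟩]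
        set subs1 := if seg.length ≥ 3 then subs ++ [seg] else subs with hsubs1
        set A := indices.getD J 0 with hAdef
        have hkey : indices.getD (J + 1) 0 = A := hdup.symm
        rw [hkey]
        set R := pspSkipA indices indices.length J A with hRdef
        have hR2 : R = pspSkipA indices indices.length (J + 2) A := by
          rw [hRdef]
          conv_lhs => rw [pspSkipA]
          rw [dif_pos ⟨by omega, hAdef.symm⟩]
          conv_lhs => rw [pspSkipA]
          rw [dif_pos ⟨by omega, hkey⟩]
        have hRgt : J < R := pspSkipA_gt indices indices.length J A (by omega) hAdef.symm
        have hRex := pspSkipA_exit indices indices.length J A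
        rw [fold_phase1 indices A (J + 2) seg subs1, ← hR2]
        by_cases hRn : indices.length ≤ R
        · rw [if_pos hRn, List.drop_eq_nil_of_le (by omega), List.foldl_nil]
          simp [pspFin]
        · rw [if_neg hRn]
          have hRlt : R < indices.length := by omega
          have hBne : indices.getD R 0 ≠ A := by
            intro hc
            exact hRex ⟨hRlt, hc⟩
          set B := indices.getD R 0 with hBdef
          rw [drop_eq_getD_cons indices R hRlt, List.foldl_cons, step1_go _ _ _ _ hBne]
          rw [fold_phase2 indices B R seg subs1]
          set I2 := pspScanB indices indices.length R B with hI2def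
          have hI2ge : R ≤ I2 := pspScanB_ge _ _ _ _
          have hI2lt : I2 < indices.length := pspScanB_lt _ _ _ _ hRlt
          have hI2val : indices.getD I2 0 = B := pspScanB_val _ _ _ _ hBdef.symm
          have hI2ex := pspScanB_exit indices indices.length R B
          have hrec := ih I2 subs1 (by omega) (by omega)
          rw [← hrec]
          by_cases hlast : indices.length - 1 ≤ I2
          · have hI2n : I2 + 1 = indices.length := by omega
            rw [hI2n, List.drop_length, List.foldl_nil]
            rw [drop_eq_getD_cons indices I2 hI2lt, hI2n, List.drop_length, List.foldl_cons,
              step0_app _ _ _ _ (by simp), List.foldl_nil]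
            simp [pspFin]
          · have hxne : indices.getD (I2 + 1) 0 ≠ B := by
              intro hc
              exact hI2ex ⟨by omega, hc⟩
            rw [drop_eq_getD_cons indices (I2 + 1) (by omega), List.foldl_cons,
              step2_go _ _ _ _ hxne]
            exact fold_restart indices I2 B subs1 (by omega) hI2val hxne
    · obtain rfl : i = indices.length := by omega
      rw [List.drop_length, List.foldl_nil, pspOuter, dif_neg (by omega)]
      simp [pspFin]

theorem master (indices : List Int) (i : Nat) (subs : List (List Int)) :
    i ≤ indices.length →
    pspFin ((indices.drop i).foldl pspStep (0, 0, [], subs)) = pspOuter indices indices.length i subs := by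
  intro h
  exact master_aux indices indices.length i subs (by omega) h
-- ===== VERDICT (by name: the statement is the Claim_ definition above) =====
theorem psp_split_pc_strip_py_spec : Claim_equal_psp_split_pc_strip_py := by
  intro indices _
  unfold Spec_psp_split_pc_strip_py psp_split_pc_strip_py psp_split_pc_strip_py_alt
  have h := master indices 0 [] (by omega)
  simpa [pspFin] using h.symm
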